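-- pv_equiv track=rewrite | github.com/njbergam/dhlab | webDeploy/simpleFunctions.py | sentenceLength
-- ===== SOURCE A (Python) =====
-- def sentenceLength(array):
-- 	lens = []
-- 	senlen = 0
-- 	for word in array:
-- 		if word == ".":
-- 			lens.append(senlen)
-- 			senlen = 0
-- 		else:
-- 			senlen = senlen + 1
-- 	return lens
-- ===== SOURCE B (Python) =====
-- def sentenceLength(array):
--     idxs = [i for i, w in enumerate(array) if w == "."]
--     res = []
--     prev = -1
--     for i in idxs:
--         res.append(i - prev - 1)
--         prev = i
--     return res
-- ===== Notes on version B (the rewrite author's own statement) =====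
-- stated objective: alternative
-- what changed: Replaces the running word counter with two passes: first collect the indices of the '.' elements, then emit the gaps between consecutive period indices (prev initialized to -1).
import Mathlib
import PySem

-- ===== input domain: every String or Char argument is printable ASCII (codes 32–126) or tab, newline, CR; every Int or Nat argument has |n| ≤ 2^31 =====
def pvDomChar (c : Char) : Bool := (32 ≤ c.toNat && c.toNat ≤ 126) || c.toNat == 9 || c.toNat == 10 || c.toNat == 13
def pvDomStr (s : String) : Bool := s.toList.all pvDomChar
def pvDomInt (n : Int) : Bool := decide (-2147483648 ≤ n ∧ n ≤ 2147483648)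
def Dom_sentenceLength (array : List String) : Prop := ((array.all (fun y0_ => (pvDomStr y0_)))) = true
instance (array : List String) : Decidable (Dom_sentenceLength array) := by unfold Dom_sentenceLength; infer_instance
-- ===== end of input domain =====

-- B replaces A's running word counter with two passes: collect the indices of the '.'
-- elements, then emit gaps between consecutive period indices (alternative decomposition).

-- ===== PORT A =====
-- A's loop: state (lens, senlen); '.' appends senlen and resets, otherwise increments.
def sentenceLengthLoopA (ws : List String) (lens : List Int) (senlen : Int) : List Int :=
  match ws with
  | [] => lens
  | w :: rest =>
    if w = "." then sentenceLengthLoopA rest (lens ++ [senlen]) 0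
    else sentenceLengthLoopA rest lens (senlen + 1)

def sentenceLength (array : List String) : List Int :=
  sentenceLengthLoopA array [] 0

-- ===== PORT B =====
-- B's second loop: for each period index i, append i - prev - 1 and set prev := i.
def sentenceLengthLoopB (idxs : List Int) (res : List Int) (prev : Int) : List Int :=
  match idxs with
  | [] => res
  | i :: rest => sentenceLengthLoopB rest (res ++ [i - prev - 1]) i

def sentenceLength_alt (array : List String) : List Int :=
  let idxs := ((PySem.List.enumerate array).filter (fun p => p.2 == ".")).map (·.1)
  sentenceLengthLoopB idxs [] (-1)

-- ===== PRECONDITION & SPEC =====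
def Spec_sentenceLength (array : List String) (out : List Int) : Prop := out = sentenceLength_alt array
instance (array : List String) (out : List Int) : Decidable (Spec_sentenceLength array out) := by unfold Spec_sentenceLength; infer_instance

-- ===== CLAIM (what is proved, stated in full; the proofs are below) =====
def Claim_equal_sentenceLength : Prop := ∀ (array : List String), Dom_sentenceLength array → Spec_sentenceLength array (sentenceLength array)

-- ===== LEMMAS AND PROOFS =====

-- The period-index list B builds, as a structural recursion starting at index k.
def periodIdxFrom (ws : List String) (k : Int) : List Int :=
  match ws with
  | [] => []
  | w :: rest => if w = "." then k :: periodIdxFrom rest (k + 1) else periodIdxFrom rest (k + 1)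

theorem filter_enumerate_eq_periodIdxFrom (ws : List String) (k : Int) :
    ((PySem.List.enumerate ws k).filter (fun p => p.2 == ".")).map (·.1) = periodIdxFrom ws k := by
  induction ws generalizing k with
  | nil => simp [PySem.List.enumerate_nil, periodIdxFrom]
  | cons w rest ih =>
    simp only [PySem.List.enumerate_cons, List.filter_cons, periodIdxFrom]
    by_cases h : w = "."
    · simp [h, ih]
    · simp [h, ih]

theorem loopA_eq_loopB (ws : List String) (prev senlen : Int) (lens : List Int) :
    sentenceLengthLoopA ws lens senlen
      = sentenceLengthLoopB (periodIdxFrom ws (prev + senlen + 1)) lens prev := by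
  induction ws generalizing prev senlen lens with
  | nil => simp [sentenceLengthLoopA, periodIdxFrom, sentenceLengthLoopB]
  | cons w rest ih =>
    simp only [sentenceLengthLoopA, periodIdxFrom]
    by_cases h : w = "."
    · simp only [h, if_true, sentenceLengthLoopB]
      have e1 : prev + senlen + 1 - prev - 1 = senlen := by ring
      have e2 : (prev + senlen + 1) + 0 + 1 = prev + senlen + 1 + 1 := by ring
      rw [e1, ih (prev + senlen + 1) 0, e2]
    · simp only [if_neg h]
      have e : prev + (senlen + 1) + 1 = prev + senlen + 1 + 1 := by ring
      rw [ih prev (senlen + 1), e]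

-- ===== VERDICT (by name: the statement is the Claim_ definition above) =====
theorem sentenceLength_spec : Claim_equal_sentenceLength := by
  intro array _
  show sentenceLength array = sentenceLength_alt array
  unfold sentenceLength sentenceLength_alt
  rw [loopA_eq_loopB array (-1) 0 [], show (PySem.List.enumerate array : List (Int × String)) = PySem.List.enumerate array 0 from rfl,
     filter_enumerate_eq_periodIdxFrom]
  norm_num
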